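-- pv_equiv track=rewrite | github.com/BptstFcn/Python-Algo | 2022-10-26_cat.py | cat_tree
-- ===== SOURCE A (Python) =====
-- def cat_tree(start: int, finish: int) -> int:
--     # Simple check so everything should be good
--     if finish <= start:
--         return 0
--
--     shelf_count: int = 0        # As we begin on a shelf, should we count from 1 ?
--     diff: int = finish - start  # Difference between start and finish
--
--     # In order to find the quickest path, we want our difference to be a multiple of 3 so the cat can jump 3 by 3
--     # As long as the difference is not a multiple of 3, we jump 1 by 1
--     while diff % 3 != 0:
--         diff -= 1
--         shelf_count += 1
--
--     # Once we do get a multiple of 3, then we can make the cat jump as fast as possible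
--     shelf_count += diff // 3 # Optimization made for this case
--
--     # while diff > 1:
--     #    diff -= 3
--     #    shelf_count += 1
--
--     return shelf_count
-- ===== SOURCE B (Python) =====
-- def cat_tree(start: int, finish: int) -> int:
--     # Closed form: number of 1-steps is diff % 3, number of 3-steps is diff // 3.
--     if finish <= start:
--         return 0
--     diff = finish - start
--     return diff % 3 + diff // 3
-- ===== Notes on version B (the rewrite author's own statement) =====
-- stated objective: simpler
-- what changed: Replaced the decrement-while-loop plus running counter with the direct closed form diff % 3 + diff // 3.
import Mathlib
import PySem

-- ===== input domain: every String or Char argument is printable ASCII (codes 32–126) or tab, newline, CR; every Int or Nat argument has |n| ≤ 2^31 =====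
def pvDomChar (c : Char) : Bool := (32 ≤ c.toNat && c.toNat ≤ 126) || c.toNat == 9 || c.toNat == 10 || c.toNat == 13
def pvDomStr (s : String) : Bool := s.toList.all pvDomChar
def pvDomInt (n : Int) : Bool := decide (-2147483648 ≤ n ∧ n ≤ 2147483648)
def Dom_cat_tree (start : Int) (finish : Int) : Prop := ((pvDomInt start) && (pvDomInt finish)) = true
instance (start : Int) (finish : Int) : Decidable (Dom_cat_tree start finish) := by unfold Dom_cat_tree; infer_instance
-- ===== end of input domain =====

-- B replaces A's decrement loop with the closed form diff % 3 + diff // 3 (simpler).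

-- ===== PORT A =====
-- the while loop of A: decrement diff and bump shelf_count until diff % 3 == 0
def catLoop (diff : Int) (shelf : Int) : Int × Int :=
  if _h : PySem.Int.mod diff 3 ≠ 0 then catLoop (diff - 1) (shelf + 1) else (diff, shelf)
termination_by (PySem.Int.mod diff 3).toNat
decreasing_by
  simp only [PySem.Int.mod_eq_emod_of_pos (by omega : (0:Int) < 3)] at *
  omega

def cat_tree (start : Int) (finish : Int) : Int :=
  if finish ≤ start then 0
  else
    let r := catLoop (finish - start) 0
    r.2 + PySem.Int.floordiv r.1 3

-- ===== PORT B =====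
def cat_tree_alt (start : Int) (finish : Int) : Int :=
  if finish ≤ start then 0
  else
    let diff := finish - start
    PySem.Int.mod diff 3 + PySem.Int.floordiv diff 3

-- ===== PRECONDITION & SPEC =====
def Spec_cat_tree (start : Int) (finish : Int) (out : Int) : Prop := out = cat_tree_alt start finish
instance (start : Int) (finish : Int) (out : Int) : Decidable (Spec_cat_tree start finish out) := by unfold Spec_cat_tree; infer_instance

-- ===== CLAIM (what is proved, stated in full; the proofs are below) =====
def Claim_equal_cat_tree : Prop := ∀ (start : Int) (finish : Int), Dom_cat_tree start finish → Spec_cat_tree start finish (cat_tree start finish)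

-- ===== LEMMAS AND PROOFS =====
-- the loop stops at the largest multiple of 3 below diff, counting the steps taken
theorem catLoop_eq (diff shelf : Int) :
    catLoop diff shelf = (diff - PySem.Int.mod diff 3, shelf + PySem.Int.mod diff 3) := by
  induction diff, shelf using catLoop.induct with
  | case1 diff shelf h ih =>
    rw [catLoop, dif_pos h, ih]
    simp only [PySem.Int.mod_eq_emod_of_pos (by omega : (0:Int) < 3), Prod.mk.injEq] at *
    omega
  | case2 diff shelf h =>
    rw [catLoop, dif_neg h]
    simp only [not_not, PySem.Int.mod_eq_emod_of_pos (by omega : (0:Int) < 3), Prod.mk.injEq] at *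
    omega

-- ===== VERDICT (by name: the statement is the Claim_ definition above) =====
theorem cat_tree_spec : Claim_equal_cat_tree := by
  intro start finish _
  unfold Spec_cat_tree cat_tree cat_tree_alt
  split
  · rfl
  · rw [catLoop_eq]
    simp only [PySem.Int.mod_eq_emod_of_pos (by omega : (0:Int) < 3),
      PySem.Int.floordiv_eq_ediv_of_pos (by omega : (0:Int) < 3)]
    omega
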